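-- pv_equiv track=rewrite | github.com/katJablonska/podstawy-kryptografii | tests.py | long_series_test
-- ===== SOURCE A (Python) =====
-- def long_series_test(bits):
--     threshold = 26
--     current_length = 0
--     previous_bit = None
--
--     for bit in bits:
--         if bit == previous_bit:
--             current_length += 1
--         else:
--             current_length = 1
--         if current_length >= threshold:
--             return False
--         previous_bit = bit
--     return True
-- ===== SOURCE B (Python) =====
-- def long_series_test(bits):
--     i = 0
--     n = len(bits)
--     while i < n:
--         j = i + 1
--         while j < n and bits[j] == bits[i]:
--             j += 1
--         if j - i >= 26:
--             return False
--         i = j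
--     return True
-- ===== Notes on version B (the rewrite author's own statement) =====
-- stated objective: alternative
-- what changed: Replaces A's element-by-element state machine (previous_bit/current_length with a per-step threshold check) by a two-pointer run segmentation: an inner pointer scans each maximal run of equal bits, and the run length j-i is checked once per run.
import Mathlib
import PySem

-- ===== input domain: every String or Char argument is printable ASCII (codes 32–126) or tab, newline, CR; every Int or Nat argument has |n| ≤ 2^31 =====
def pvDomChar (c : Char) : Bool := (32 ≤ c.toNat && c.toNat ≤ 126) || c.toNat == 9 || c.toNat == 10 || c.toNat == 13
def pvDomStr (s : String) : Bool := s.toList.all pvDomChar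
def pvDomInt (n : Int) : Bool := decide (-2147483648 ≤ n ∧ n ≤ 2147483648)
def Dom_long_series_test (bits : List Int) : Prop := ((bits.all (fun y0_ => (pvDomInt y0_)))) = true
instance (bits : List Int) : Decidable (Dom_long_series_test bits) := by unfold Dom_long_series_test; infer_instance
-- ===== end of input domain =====

-- B replaces A's per-element previous_bit/current_length state machine by a two-pointer
-- scan over maximal runs of equal bits (alternative decomposition, same cost).


-- ===== PORT A =====
-- for-loop over bits with state (previous_bit : Option Int, current_length : Int);
-- A's early 'return False' becomes returning false from the recursion.
def aGo (prev : Option Int) (curLen : Int) : List Int → Bool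
  | [] => true
  | bit :: rest =>
      let curLen' := if some bit == prev then curLen + 1 else 1
      if curLen' ≥ 26 then false else aGo (some bit) curLen' rest

def long_series_test (bits : List Int) : Bool := aGo none 0 bits

-- ===== PORT B =====
-- inner while loop: advance j while j < n and bits[j] == bits[i]
def altInner (bits : List Int) (n i : Int) (j : Int) : Int :=
  if _h : j < n then
    if PySem.List.pyGet? bits j == PySem.List.pyGet? bits i then altInner bits n i (j + 1) else j
  else j
termination_by (n - j).toNat
decreasing_by omega

-- needed for altOuter's termination: the inner loop never moves j backwards
theorem altInner_ge (bits : List Int) (n i : Int) : ∀ j, j ≤ altInner bits n i j := by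
  intro j
  fun_induction altInner bits n i j with
  | case1 j h heq ih => omega
  | case2 j h heq => omega
  | case3 j h => omega

-- outer while loop over run starts i; checks each run length j - i once
def altOuter (bits : List Int) (n : Int) (i : Int) : Bool :=
  if _h : i < n then
    let j := altInner bits n i (i + 1)
    if j - i ≥ 26 then false
    else altOuter bits n j
  else true
termination_by (n - i).toNat
decreasing_by
  have := altInner_ge bits n i (i + 1)
  omega

def long_series_test_alt (bits : List Int) : Bool := altOuter bits (bits.length : Int) 0

-- ===== PRECONDITION & SPEC =====
def Spec_long_series_test (bits : List Int) (out : Bool) : Prop := out = long_series_test_alt bits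
instance (bits : List Int) (out : Bool) : Decidable (Spec_long_series_test bits out) := by unfold Spec_long_series_test; infer_instance

-- ===== CLAIM (what is proved, stated in full; the proofs are below) =====
def Claim_equal_long_series_test : Prop := ∀ (bits : List Int), Dom_long_series_test bits → Spec_long_series_test bits (long_series_test bits)

-- ===== LEMMAS AND PROOFS =====

-- length of the maximal leading run of v's
def runLen (v : Int) : List Int → Nat
  | [] => 0
  | x :: xs => if x = v then runLen v xs + 1 else 0

-- clean run-recursion both loops reduce to
def clean : List Int → Bool
  | [] => true
  | x :: rest =>
      if 1 + runLen x rest ≥ 26 then false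
      else clean (rest.drop (runLen x rest))
termination_by xs => xs.length
decreasing_by
  simp

theorem altInner_eq (bits : List Int) (i : Int) (v : Int)
    (hv : PySem.List.pyGet? bits i = some v) :
    ∀ j, 0 ≤ j → altInner bits (bits.length : Int) i j = j + runLen v (bits.drop j.toNat) := by
  intro j hj
  fun_induction altInner bits (bits.length : Int) i j with
  | case1 j h heq ih =>
    have hjn : j.toNat < bits.length := by omega
    have hg : PySem.List.pyGet? bits j = some bits[j.toNat] :=
      PySem.List.pyGet?_eq_some_getElem bits (by omega) (by omega)
    rw [hg, hv] at heq
    have hxv : bits[j.toNat] = v := by simpa using heq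
    have hdrop : bits.drop j.toNat = bits[j.toNat] :: bits.drop (j.toNat + 1) :=
      List.drop_eq_getElem_cons hjn
    have h1 : (j + 1).toNat = j.toNat + 1 := by omega
    rw [hdrop, hxv, ih (by omega), h1]
    simp [runLen]
    omega
  | case2 j h heq =>
    have hg : PySem.List.pyGet? bits j = some bits[j.toNat] :=
      PySem.List.pyGet?_eq_some_getElem bits (by omega) (by omega)
    rw [hg, hv] at heq
    have hxv : ¬ (bits[j.toNat] = v) := by simpa using heq
    have hdrop : bits.drop j.toNat = bits[j.toNat] :: bits.drop (j.toNat + 1) :=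
      List.drop_eq_getElem_cons (by omega)
    rw [hdrop]
    simp [runLen, hxv]
  | case3 j h =>
    have : bits.drop j.toNat = [] := List.drop_eq_nil_of_le (by omega)
    simp [this, runLen]

theorem altOuter_eq (bits : List Int) : ∀ (i : Int), 0 ≤ i →
    altOuter bits (bits.length : Int) i = clean (bits.drop i.toNat) := by
  intro i hi
  fun_induction altOuter bits (bits.length : Int) i with
  | case1 i h j hge =>
    have hin : i.toNat < bits.length := by omega
    have hv : PySem.List.pyGet? bits i = some bits[i.toNat] :=
      PySem.List.pyGet?_eq_some_getElem bits (by omega) (by omega)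
    have hdrop : bits.drop i.toNat = bits[i.toNat] :: bits.drop (i.toNat + 1) :=
      List.drop_eq_getElem_cons hin
    have hj : j = i + 1 + runLen bits[i.toNat] (bits.drop (i.toNat + 1)) := by
      have h2 := altInner_eq bits i bits[i.toNat] hv (i + 1) (by omega)
      have h1 : (i + 1).toNat = i.toNat + 1 := by omega
      rw [h1] at h2
      simpa using h2
    rw [hdrop, clean]
    have : (1 + runLen bits[i.toNat] (bits.drop (i.toNat + 1)) ≥ 26) := by omega
    simp [this]
  | case2 i h j hge ih =>
    have hin : i.toNat < bits.length := by omega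
    have hv : PySem.List.pyGet? bits i = some bits[i.toNat] :=
      PySem.List.pyGet?_eq_some_getElem bits (by omega) (by omega)
    have hdrop : bits.drop i.toNat = bits[i.toNat] :: bits.drop (i.toNat + 1) :=
      List.drop_eq_getElem_cons hin
    have hj : j = i + 1 + runLen bits[i.toNat] (bits.drop (i.toNat + 1)) := by
      have h2 := altInner_eq bits i bits[i.toNat] hv (i + 1) (by omega)
      have h1 : (i + 1).toNat = i.toNat + 1 := by omega
      rw [h1] at h2
      simpa using h2
    rw [hdrop, clean]
    have hc : ¬ (1 + runLen bits[i.toNat] (bits.drop (i.toNat + 1)) ≥ 26) := by omega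
    rw [if_neg hc, ih (by omega)]
    have hjn : j.toNat = i.toNat + 1 + runLen bits[i.toNat] (bits.drop (i.toNat + 1)) := by omega
    rw [hjn]
    rw [List.drop_drop]
  | case3 i h =>
    have : bits.drop i.toNat = [] := List.drop_eq_nil_of_le (by omega)
    rw [this, clean]

theorem aGo_eq (xs : List Int) : ∀ (cur k : Int), 1 ≤ k → k < 26 →
    aGo (some cur) k xs =
      (if k + runLen cur xs ≥ 26 then false else clean (xs.drop (runLen cur xs))) := by
  induction xs with
  | nil =>
    intro cur k h1 h2
    simp only [runLen, aGo, List.drop_nil, Nat.cast_zero, add_zero]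
    rw [if_neg (by omega : ¬ k ≥ 26), show clean [] = true from by rw [clean]]
  | cons x xs ih =>
    intro cur k h1 h2
    by_cases hx : x = cur
    · subst hx
      simp only [aGo, runLen, BEq.rfl, if_true]
      by_cases hk : k + 1 ≥ 26
      · simp only [if_pos hk]
        rw [if_pos (by push_cast; omega)]
      · rw [if_neg hk, ih x (k + 1) (by omega) (by omega)]
        simp only [List.drop_succ_cons]
        split_ifs with ha hb hb
        · rfl
        · exact absurd (by push_cast at ha; omega) hb
        · exact absurd (by push_cast at hb; omega) ha
        · rfl
    · have hne : (some x == some cur) = false := by simp [hx]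
      simp only [aGo, runLen, hne, if_neg hx, Bool.false_eq_true, if_false]
      rw [if_neg (by omega : ¬ (1 : Int) ≥ 26)]
      rw [ih x 1 (by omega) (by omega)]
      simp only [Nat.cast_zero, add_zero, List.drop_zero]
      rw [if_neg (by omega : ¬ k ≥ 26)]
      rw [show clean (x :: xs) = if 1 + runLen x xs ≥ 26 then false
            else clean (xs.drop (runLen x xs)) from by rw [clean]]
      split_ifs with ha hb hb
      · rfl
      · exact absurd (by push_cast at ha; omega) hb
      · exact absurd (by push_cast at hb; omega) ha
      · rfl

-- ===== VERDICT (by name: the statement is the Claim_ definition above) =====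
theorem long_series_test_spec : Claim_equal_long_series_test := by
  intro bits _
  unfold Spec_long_series_test long_series_test long_series_test_alt
  rw [altOuter_eq bits 0 le_rfl]
  simp only [Int.toNat_zero, List.drop_zero]
  cases bits with
  | nil => simp [aGo]; rw [clean]
  | cons x xs =>
    have hne : (some x == (none : Option Int)) = false := by simp
    simp only [aGo, hne, Bool.false_eq_true, if_false]
    rw [if_neg (by omega : ¬ (1 : Int) ≥ 26)]
    rw [aGo_eq xs x 1 (by omega) (by omega)]
    rw [show clean (x :: xs) = if 1 + runLen x xs ≥ 26 then false
          else clean (xs.drop (runLen x xs)) from by rw [clean]]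
    split_ifs with ha hb hb
    · rfl
    · exact absurd (by push_cast at ha; omega) hb
    · exact absurd (by push_cast at hb; omega) ha
    · rfl
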